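-- pv_equiv track=rewrite | github.com/Kyashar/101-projects | problemes/sorts/buble_sort.py | one_iteration
-- ===== SOURCE A (Python) =====
-- def one_iteration(l):
--     is_sort = True
--
--     for index in range(0, l.__len__() - 1):
--         if l[index] > l[index + 1]:
--             tmp = l[index]
--             l[index] = l[index + 1]
--             l[index + 1] = tmp
--
--             is_sort = False
--     return l, is_sort
-- ===== SOURCE B (Python) =====
-- def one_iteration(l):
--     # Note: unlike the original, this does not mutate l in place; the
--     # returned (list, flag) values are the same.
--     is_sort = all(a <= b for a, b in zip(l, l[1:]))
--     res = []
--     carry = None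
--     for x in l:
--         if carry is None:
--             carry = x
--         elif carry > x:
--             res.append(x)
--         else:
--             res.append(carry)
--             carry = x
--     if carry is not None:
--         res.append(carry)
--     return res, is_sort
-- ===== Notes on version B (the rewrite author's own statement) =====
-- stated objective: alternative
-- what changed: Replaces the index-based in-place swap loop (flag fused into it) with a separate adjacent-pair sortedness scan plus a single forward scan that carries the bubbling element and appends to a fresh output list (no indexing, no swaps, no mutation).
import Mathlib
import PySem

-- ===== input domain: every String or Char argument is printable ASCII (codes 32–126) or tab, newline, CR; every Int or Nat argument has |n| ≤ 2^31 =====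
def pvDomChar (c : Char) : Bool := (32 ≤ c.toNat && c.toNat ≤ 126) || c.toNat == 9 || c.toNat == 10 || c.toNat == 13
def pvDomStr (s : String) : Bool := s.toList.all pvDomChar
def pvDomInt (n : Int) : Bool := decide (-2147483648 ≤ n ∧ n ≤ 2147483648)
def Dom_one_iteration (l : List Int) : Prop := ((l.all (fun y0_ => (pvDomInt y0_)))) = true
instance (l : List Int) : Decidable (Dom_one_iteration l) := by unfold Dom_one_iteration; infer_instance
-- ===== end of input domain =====

-- B replaces A's fused index/swap loop by a sortedness scan plus a carry-based forward
-- scan building a fresh list; A mutates its argument in place, B does not — the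
-- equivalence proved here is about the RETURN value only.

-- ===== PORT A =====
-- A's loop body: compare l[index] and l[index+1], swap in place, clear the flag.
def pvStepA (st : List Int × Bool) (index : Int) : List Int × Bool :=
  match PySem.List.pyGet? st.1 index, PySem.List.pyGet? st.1 (index + 1) with
  | some a, some b =>
      if a > b then
        (PySem.List.pySetD (PySem.List.pySetD st.1 index b) (index + 1) a, false)
      else st
  | _, _ => st

def one_iteration (l : List Int) : List Int × Bool :=
  (PySem.List.pyRange 0 ((l.length : Int) - 1) 1).foldl pvStepA (l, true)

-- ===== PORT B =====
-- B's loop body: carry the bubbling element forward, appending the smaller one.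
def pvStepB (st : List Int × Option Int) (x : Int) : List Int × Option Int :=
  match st.2 with
  | none => (st.1, some x)
  | some c => if c > x then (st.1 ++ [x], some c) else (st.1 ++ [c], some x)

-- B's trailing 'if carry is not None: res.append(carry)'.
def pvFinish (st : List Int × Option Int) : List Int :=
  match st.2 with
  | none => st.1
  | some c => st.1 ++ [c]

def one_iteration_alt (l : List Int) : List Int × Bool :=
  let is_sort := (l.zip (PySem.List.slice l (some 1) none)).all (fun p => decide (p.1 ≤ p.2))
  (pvFinish (l.foldl pvStepB ([], none)), is_sort)

-- ===== PRECONDITION & SPEC =====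
def Spec_one_iteration (l : List Int) (out : List Int × Bool) : Prop := out = one_iteration_alt l
instance (l : List Int) (out : List Int × Bool) : Decidable (Spec_one_iteration l out) := by unfold Spec_one_iteration; infer_instance

-- ===== CLAIM (what is proved, stated in full; the proofs are below) =====
def Claim_equal_one_iteration : Prop := ∀ (l : List Int), Dom_one_iteration l → Spec_one_iteration l (one_iteration l)

-- ===== LEMMAS AND PROOFS =====

-- Proof-only helper: 'some swap happens during A's pass when the carried element is c'.
def pvSwapped (c : Int) (rest : List Int) : Bool :=
  match rest with
  | [] => false
  | x :: r => if c > x then true else pvSwapped x r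

theorem pvSet_at (res : List Int) (a v : Int) (rest : List Int) :
    (res ++ a :: rest).set res.length v = res ++ v :: rest := by
  induction res with
  | nil => simp
  | cons y ys ih => simp [ih]

theorem pvSet_at1 (res : List Int) (a b v : Int) (rest : List Int) :
    (res ++ a :: b :: rest).set (res.length + 1) v = res ++ a :: v :: rest := by
  induction res with
  | nil => simp
  | cons y ys ih => simp [ih]

theorem pvStepA_eq (res : List Int) (c x : Int) (rest : List Int) (flag : Bool) :
    pvStepA (res ++ c :: x :: rest, flag) (res.length : Int)
      = if c > x then (res ++ x :: c :: rest, false) else (res ++ c :: x :: rest, flag) := by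
  have h1 : PySem.List.pyGet? (res ++ c :: x :: rest) (res.length : Int) = some c :=
    PySem.List.pyGet?_append_length res (x :: rest) c
  have hcast : ((res.length : Int) + 1) = (((res.length + 1 : Nat)) : Int) := by push_cast; ring
  have h2 : PySem.List.pyGet? (res ++ c :: x :: rest) ((res.length : Int) + 1) = some x := by
    have he : res ++ c :: x :: rest = (res ++ [c]) ++ x :: rest := by simp
    rw [he, hcast]
    have := PySem.List.pyGet?_append_length (res ++ [c]) rest x
    simpa using this
  unfold pvStepA
  rw [h1, h2]
  by_cases h : c > x
  · simp only [if_pos h]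
    rw [hcast, PySem.List.pySetD_natCast, PySem.List.pySetD_natCast,
        pvSet_at res c x (x :: rest), pvSet_at1 res x x c rest]
  · simp [h]

theorem pvSim (rest : List Int) : ∀ (res : List Int) (c : Int) (flag : Bool),
    ((List.range' res.length rest.length).map (fun k : Nat => (k : Int))).foldl pvStepA
        (res ++ c :: rest, flag)
      = (pvFinish (rest.foldl pvStepB (res, some c)), flag && !pvSwapped c rest) := by
  induction rest with
  | nil =>
      intro res c flag
      simp [pvFinish, pvSwapped]
  | cons x r ih =>
      intro res c flag
      simp only [List.length_cons, List.range'_succ, List.map_cons, List.foldl_cons]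
      rw [pvStepA_eq]
      by_cases h : c > x
      · simp only [if_pos h]
        have harr : res ++ x :: c :: r = (res ++ [x]) ++ c :: r := by simp
        have hlen : res.length + 1 = (res ++ [x]).length := by simp
        rw [harr, hlen, ih (res ++ [x]) c false]
        simp [pvStepB, pvSwapped, h]
      · simp only [if_neg h]
        have harr : res ++ c :: x :: r = (res ++ [c]) ++ x :: r := by simp
        have hlen : res.length + 1 = (res ++ [c]).length := by simp
        rw [harr, hlen, ih (res ++ [c]) x flag]
        simp [pvStepB, pvSwapped, h]

theorem pvFlag_eq (rest : List Int) : ∀ (c : Int),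
    ((c :: rest).zip rest).all (fun p => decide (p.1 ≤ p.2)) = !pvSwapped c rest := by
  induction rest with
  | nil => intro c; simp [pvSwapped]
  | cons x r ih =>
      intro c
      by_cases h : c > x
      · simp [pvSwapped, h, show ¬ c ≤ x by omega]
      · simp [pvSwapped, h, show c ≤ x by omega, ih x]

-- ===== VERDICT (by name: the statement is the Claim_ definition above) =====
theorem one_iteration_spec : Claim_equal_one_iteration := by
  intro l _
  unfold Spec_one_iteration
  cases l with
  | nil => decide
  | cons c rest =>
      unfold one_iteration one_iteration_alt
      have hb : ((c :: rest).length : Int) - 1 = (rest.length : Int) := by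
        simp
      rw [hb, PySem.List.pyRange_one]
      simp only [sub_zero, Int.toNat_natCast, zero_add, List.range_eq_range']
      have h0 : ((c :: rest : List Int), true) = (([] : List Int) ++ c :: rest, true) := by simp
      rw [h0, show (0 : Nat) = ([] : List Int).length from rfl, pvSim rest [] c true]
      have hslice : PySem.List.slice (c :: rest) (some 1) none = rest := by
        rw [show (1 : Int) = ((1 : Nat) : Int) from by norm_num, PySem.List.slice_from_natCast]
        simp
      rw [hslice]
      simp only [List.foldl_cons, pvStepB, pvFlag_eq rest c, Bool.true_and]
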